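-- pv_equiv track=rewrite | github.com/rajeshpp/ML-AI | DS/Online_NPTEL/Week4/asn2_polynomial_ops.py | poly_valid
-- ===== SOURCE A (Python) =====
-- def poly_valid(p):
--     d={}
--     """Below for loop converts polynomial into dictionary as {exponent:coefficient}.
--     Below for loop also returns False, if we have 2 same exponents in single polynomial"""
--     for tup in p:
--         if d.get(tup[1]):
--             return False
--         else:
--             d.setdefault(tup[1],tup[0])
--     """Below for loop returns False, if we have any zero cofficient.
--        Also, Below for loop returns False, if we have any negative exponents """
--     for k,v in d.items():
--         if v==0:
--             return False
--         if k<0: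
--             return False
--     return True
-- ===== SOURCE B (Python) =====
-- def poly_valid(p):
--     seen = set()
--     for tup in p:
--         if tup[1] in seen:
--             return False
--         seen.add(tup[1])
--         if tup[0] == 0 or tup[1] < 0:
--             return False
--     return True
-- ===== Notes on version B (the rewrite author's own statement) =====
-- stated objective: simpler
-- what changed: Replaces A's two-pass build-a-dict-then-rescan-its-items structure with a single pass over p maintaining only a set of seen exponents, rejecting duplicates, zero coefficients and negative exponents as they are encountered.
import Mathlib
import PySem

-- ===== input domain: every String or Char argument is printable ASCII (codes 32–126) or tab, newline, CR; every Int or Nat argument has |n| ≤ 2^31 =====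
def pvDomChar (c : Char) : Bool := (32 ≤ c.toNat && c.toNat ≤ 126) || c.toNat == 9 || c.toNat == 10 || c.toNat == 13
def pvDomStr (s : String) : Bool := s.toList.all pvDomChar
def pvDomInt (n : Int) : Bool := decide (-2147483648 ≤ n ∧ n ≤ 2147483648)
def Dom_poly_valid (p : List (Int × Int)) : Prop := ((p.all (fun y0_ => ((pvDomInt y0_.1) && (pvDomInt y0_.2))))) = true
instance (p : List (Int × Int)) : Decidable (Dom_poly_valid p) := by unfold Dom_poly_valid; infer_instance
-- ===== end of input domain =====

-- B replaces A's two-pass dict-build-then-rescan with a single pass over p keeping only a set of seen exponents; objective: simpler.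


-- ===== PORT A =====
-- first loop: builds d = {exponent: coefficient} via setdefault, early `return False` (none) when d.get(tup[1]) is truthy
def polyValidLoop1 : List (Int × Int) → PySem.Dict Int Int → Option (PySem.Dict Int Int)
  | [], d => some d
  | tup :: rest, d =>
    if ((d.get? tup.2).getD 0) ≠ 0 then none
    else polyValidLoop1 rest (d.setdefault tup.2 tup.1)

-- second loop: over d.items(), rejects zero coefficient (value) or negative exponent (key)
def polyValidLoop2 : List (Int × Int) → Bool
  | [] => true
  | (k, v) :: rest => if v = 0 then false else if k < 0 then false else polyValidLoop2 rest

def poly_valid (p : List (Int × Int)) : Bool :=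
  match polyValidLoop1 p PySem.Dict.empty with
  | none => false
  | some d => polyValidLoop2 d.items

-- ===== PORT B =====
def polyValidAltLoop : List (Int × Int) → PySem.Set Int → Bool
  | [], _ => true
  | tup :: rest, seen =>
    if PySem.Set.contains seen tup.2 then false
    else
      let seen' := PySem.Set.add seen tup.2
      if tup.1 = 0 ∨ tup.2 < 0 then false else polyValidAltLoop rest seen'

def poly_valid_alt (p : List (Int × Int)) : Bool :=
  polyValidAltLoop p PySem.Set.empty

-- ===== PRECONDITION & SPEC =====
def Spec_poly_valid (p : List (Int × Int)) (out : Bool) : Prop := out = poly_valid_alt p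
instance (p : List (Int × Int)) (out : Bool) : Decidable (Spec_poly_valid p out) := by unfold Spec_poly_valid; infer_instance

-- ===== CLAIM (what is proved, stated in full; the proofs are below) =====
def Claim_equal_poly_valid : Prop := ∀ (p : List (Int × Int)), Dom_poly_valid p → Spec_poly_valid p (poly_valid p)

-- ===== LEMMAS AND PROOFS =====

-- a zero value anywhere in the items list makes A's second loop return false
lemma polyValidLoop2_false_of_zero {l : List (Int × Int)} {k : Int}
    (h : (k, (0 : Int)) ∈ l) : polyValidLoop2 l = false := by
  induction l with
  | nil => cases h
  | cons hd tl ih =>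
    obtain ⟨a, b⟩ := hd
    simp only [polyValidLoop2]
    rcases List.mem_cons.mp h with heq | hmem
    · cases heq; simp
    · split_ifs <;> simp [ih hmem]

-- A's second loop distributes over appending one item
lemma polyValidLoop2_append (l : List (Int × Int)) (k v : Int) :
    polyValidLoop2 (l ++ [(k, v)])
      = (polyValidLoop2 l && (!(decide (v = 0)) && !(decide (k < 0)))) := by
  induction l with
  | nil => simp [polyValidLoop2]
  | cons hd tl ih =>
    obtain ⟨a, b⟩ := hd
    simp only [List.cons_append, polyValidLoop2]
    split_ifs <;> simp [ih]

-- main invariant linking A's dict to B's seen-set (= the dict's key list)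
lemma loop_agree (rest : List (Int × Int)) :
    ∀ (d : PySem.Dict Int Int), d.keys.Nodup →
      (match polyValidLoop1 rest d with
        | none => false
        | some d' => polyValidLoop2 d'.items)
      = (polyValidLoop2 d.items && polyValidAltLoop rest d.keys) := by
  induction rest with
  | nil => intro d _; simp [polyValidLoop1, polyValidAltLoop]
  | cons tup rest ih =>
    intro d hnd
    obtain ⟨c, e⟩ := tup
    by_cases hc : d.contains e = true
    · -- e is already a key of d
      obtain ⟨v, hv⟩ : ∃ v, d.get? e = some v := by
        rcases h : d.get? e with _ | v
        · rw [PySem.Dict.contains_eq_isSome_get?, h] at hc; simp at hc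
        · exact ⟨v, rfl⟩
      have hkey : e ∈ d.keys := (PySem.Dict.contains_iff_mem_keys d e).mp hc
      have hb : polyValidAltLoop ((c, e) :: rest) d.keys = false := by
        simp [polyValidAltLoop, PySem.Set.contains, hkey]
      rw [hb]
      by_cases hv0 : v = 0
      · -- d.get(e) is falsy (value 0): loop1 continues with unchanged d, but items contain (e,0)
        subst hv0
        have hset : d.setdefault e c = d := PySem.Dict.setdefault_of_contains d c hc
        have hz : polyValidLoop2 d.items = false :=
          polyValidLoop2_false_of_zero (PySem.Dict.mem_items_of_get?_eq_some d hv)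
        simp only [polyValidLoop1, hv, Option.getD_some, hset]
        rw [if_neg (by simp), ih d hnd, hz]
        simp
      · -- truthy: loop1 returns none
        simp only [polyValidLoop1, hv, Option.getD_some]
        rw [if_pos hv0]
        simp
    · -- e is a fresh key
      have hget : d.get? e = none := by
        rcases h : d.get? e with _ | v
        · rfl
        · exfalso; rw [PySem.Dict.contains_eq_isSome_get?, h] at hc; simp at hc
      have hkey : e ∉ d.keys := fun h => hc ((PySem.Dict.contains_iff_mem_keys d e).mpr h)
      have hcb : d.contains e = false := by
        cases h : d.contains e
        · rfl
        · exact absurd h hc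
      have hset : d.setdefault e c = d.insert e c := PySem.Dict.setdefault_of_not_contains d c hcb
      have hitems : (d.insert e c).items = d.items ++ [(e, c)] :=
        PySem.Dict.items_insert_of_not_contains d c hcb
      have hkeys : (d.insert e c).keys = d.keys ++ [e] :=
        PySem.Dict.keys_insert_of_not_contains d c hcb
      have hnd' : (d.insert e c).keys.Nodup := PySem.Dict.nodup_keys_insert d e c hnd
      have hadd : PySem.Set.add d.keys e = d.keys ++ [e] := by
        simp [PySem.Set.add, PySem.Set.contains, hkey]
      simp only [polyValidLoop1, hget, Option.getD_none]
      rw [if_neg (by simp), hset, ih _ hnd', hitems, hkeys,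
        polyValidLoop2_append]
      have hbB : polyValidAltLoop ((c, e) :: rest) d.keys
          = if c = 0 ∨ e < 0 then false else polyValidAltLoop rest (d.keys ++ [e]) := by
        simp only [polyValidAltLoop, PySem.Set.contains]
        rw [if_neg (by simpa using hkey), hadd]
      rw [hbB]
      by_cases hz : c = 0 ∨ e < 0
      · rw [if_pos hz]
        rcases hz with hz | hz <;> simp [hz]
      · push Not at hz
        rw [if_neg (by push Not; exact hz)]
        simp [hz.1, not_lt.mpr hz.2]

-- ===== VERDICT (by name: the statement is the Claim_ definition above) =====
theorem poly_valid_spec : Claim_equal_poly_valid := by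
  intro p _
  unfold Spec_poly_valid poly_valid poly_valid_alt
  have h := loop_agree p PySem.Dict.empty (by simp)
  rw [h]
  simp [PySem.Dict.keys, PySem.Dict.empty, polyValidLoop2, PySem.Set.empty]
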